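-- pv_equiv track=rewrite | github.com/Humzazohair/Tweet_Analysis | unigram_bigram_model/unigram_naive_bayes.py | bag_seperator
-- ===== SOURCE A (Python) =====
-- from typing import List
--
-- def bag_seperator(train_labels, train_text)->List[List[str]]:
--     positive_bag = []
--     negative_bag = []
--     res = []
--
--     for i in range(len(train_labels)):
--         for word in train_text[i]:
--             if train_labels[i] == "INFORMATIVE":
--                 positive_bag.append(word)
--             else:
--                 negative_bag.append(word)
--
--     res.append(positive_bag)
--     res.append(negative_bag)
--
--     return res
-- ===== SOURCE B (Python) =====
-- def bag_seperator(train_labels, train_text):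
--     pairs = list(zip(train_labels, train_text))
--     positive_bag = [w for lab, ws in pairs if lab == "INFORMATIVE" for w in ws]
--     negative_bag = [w for lab, ws in pairs if lab != "INFORMATIVE" for w in ws]
--     return [positive_bag, negative_bag]
-- ===== Notes on version B (the rewrite author's own statement) =====
-- stated objective: idiomatic
-- what changed: Replaces the single index-driven loop with an inner branch by zipping labels with texts once and building each bag as its own filtered flattening pass (two independent comprehensions).
import Mathlib
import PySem

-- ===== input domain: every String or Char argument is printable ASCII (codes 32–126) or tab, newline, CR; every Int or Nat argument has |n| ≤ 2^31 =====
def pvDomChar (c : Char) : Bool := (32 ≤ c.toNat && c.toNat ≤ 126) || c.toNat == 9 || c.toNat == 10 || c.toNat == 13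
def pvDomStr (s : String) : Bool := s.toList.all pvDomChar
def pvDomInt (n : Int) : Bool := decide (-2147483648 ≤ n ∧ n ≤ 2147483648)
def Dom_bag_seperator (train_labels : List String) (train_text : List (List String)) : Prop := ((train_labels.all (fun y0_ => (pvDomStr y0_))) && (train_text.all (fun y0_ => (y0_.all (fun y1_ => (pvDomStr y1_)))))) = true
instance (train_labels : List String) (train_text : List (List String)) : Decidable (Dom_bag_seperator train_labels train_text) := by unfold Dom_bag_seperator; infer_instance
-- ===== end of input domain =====

-- B builds the two bags by zipping labels with texts once and doing two independent
-- filtered flattening passes, instead of A's single index-driven loop with an inner branch.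

-- ===== PORT A =====
-- literal transliteration: for i in range(len(train_labels)): for word in train_text[i]: branch on train_labels[i]
def bag_seperator (train_labels : List String) (train_text : List (List String)) : List (List String) :=
  let st := (PySem.List.pyRange 0 (train_labels.length : Int) 1).foldl
    (fun (st : List String × List String) i =>
      (PySem.List.pyGetD train_text i []).foldl
        (fun (st : List String × List String) word =>
          if PySem.List.pyGetD train_labels i "" == "INFORMATIVE" then (st.1 ++ [word], st.2)
          else (st.1, st.2 ++ [word])) st)
    ([], [])
  [st.1, st.2]

-- ===== PORT B =====
def bag_seperator_alt (train_labels : List String) (train_text : List (List String)) : List (List String) :=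
  let pairs := train_labels.zip train_text
  let positive_bag := pairs.flatMap (fun p => if p.1 == "INFORMATIVE" then p.2 else [])
  let negative_bag := pairs.flatMap (fun p => if p.1 != "INFORMATIVE" then p.2 else [])
  [positive_bag, negative_bag]

-- ===== PRECONDITION & SPEC =====
-- A indexes train_text[i] for every i < len(train_labels); when train_text is shorter it raises IndexError,
-- so Pre_ requires train_text to be at least as long as train_labels.
def Pre_bag_seperator (train_labels : List String) (train_text : List (List String)) : Prop :=
  train_labels.length ≤ train_text.length
instance (train_labels : List String) (train_text : List (List String)) : Decidable (Pre_bag_seperator train_labels train_text) := by unfold Pre_bag_seperator; infer_instance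
def pvWitness_bag_seperator : List String × List (List String) :=
  (["INFORMATIVE", "other"], [["a", "b"], ["c"]])

def Spec_bag_seperator (train_labels : List String) (train_text : List (List String)) (out : List (List String)) : Prop := out = bag_seperator_alt train_labels train_text
instance (train_labels : List String) (train_text : List (List String)) (out : List (List String)) : Decidable (Spec_bag_seperator train_labels train_text out) := by unfold Spec_bag_seperator; infer_instance

-- ===== CLAIM (what is proved, stated in full; the proofs are below) =====
def Claim_equal_bag_seperator : Prop := ∀ (train_labels : List String) (train_text : List (List String)), Dom_bag_seperator train_labels train_text → Pre_bag_seperator train_labels train_text → Spec_bag_seperator train_labels train_text (bag_seperator train_labels train_text)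

-- ===== LEMMAS AND PROOFS =====

-- the body of A's outer loop, viewed as a function of the (label, words) pair at index i
def pairStep (st : List String × List String) (p : String × List String) : List String × List String :=
  p.2.foldl
    (fun (st : List String × List String) w =>
      if p.1 == "INFORMATIVE" then (st.1 ++ [w], st.2) else (st.1, st.2 ++ [w])) st

-- a fold over a word list appending each word to one of the two accumulators
theorem foldl_words_pos (ws pos neg : List String) :
    ws.foldl (fun (st : List String × List String) w => (st.1 ++ [w], st.2)) (pos, neg)
      = (pos ++ ws, neg) := by
  induction ws generalizing pos with
  | nil => simp
  | cons w t ih => simp [ih]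

theorem foldl_words_neg (ws pos neg : List String) :
    ws.foldl (fun (st : List String × List String) w => (st.1, st.2 ++ [w])) (pos, neg)
      = (pos, neg ++ ws) := by
  induction ws generalizing neg with
  | nil => simp
  | cons w t ih => simp [ih]

-- the fold over the zipped pairs computes the two filtered flattenings
theorem foldl_pairs (pairs : List (String × List String)) (pos neg : List String) :
    pairs.foldl pairStep (pos, neg)
    = (pos ++ pairs.flatMap (fun p => if p.1 == "INFORMATIVE" then p.2 else []),
       neg ++ pairs.flatMap (fun p => if p.1 != "INFORMATIVE" then p.2 else [])) := by
  induction pairs generalizing pos neg with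
  | nil => simp
  | cons p t ih =>
    obtain ⟨lab, ws⟩ := p
    by_cases h : lab = "INFORMATIVE"
    · subst h
      simp [pairStep, foldl_words_pos, ih]
    · simp [pairStep, h, foldl_words_neg, ih]

-- ===== VERDICT (by name: the statement is the Claim_ definition above) =====
theorem bag_seperator_spec : Claim_equal_bag_seperator := by
  intro labels text _ hpre
  have hp : labels.length ≤ text.length := hpre
  unfold Spec_bag_seperator bag_seperator bag_seperator_alt
  have hlen : (labels.zip text).length = labels.length := by
    simp [List.length_zip]; omega
  have h1 :
      (PySem.List.pyRange 0 (labels.length : Int) 1).foldl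
        (fun (st : List String × List String) i =>
          (PySem.List.pyGetD text i []).foldl
            (fun (st : List String × List String) word =>
              if PySem.List.pyGetD labels i "" == "INFORMATIVE" then (st.1 ++ [word], st.2)
              else (st.1, st.2 ++ [word])) st)
        ([], [])
      = (PySem.List.pyRange 0 (((labels.zip text).length : Int)) 1).foldl
          (fun acc j => pairStep acc (PySem.List.pyGetD (labels.zip text) j ("", [])))
          ([], []) := by
    rw [hlen]
    apply PySem.List.foldl_congr_mem
    intro acc i hi
    have hi' := (PySem.List.mem_pyRange_one).1 hi
    have h0 : (0:Int) ≤ i := hi'.1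
    have h1' : i < (labels.length : Int) := hi'.2
    have hkz : i.toNat < (labels.zip text).length := by omega
    rw [PySem.List.pyGetD_eq_getElem labels "" h0 (by omega),
        PySem.List.pyGetD_eq_getElem text [] h0 (by omega),
        PySem.List.pyGetD_eq_getElem (labels.zip text) ("", []) h0 (by omega)]
    simp [pairStep, List.getElem_zip]
  rw [h1, PySem.List.foldl_pyRange_zero_pyGetD' (labels.zip text) ("", []) pairStep ([], []),
      foldl_pairs]
  simp
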